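-- pv_equiv track=rewrite | github.com/nk17kumar/The-Frustrated-Recruiter-v.1.1 | RecruiterBot.py | fetchTechSkills
-- ===== SOURCE A (Python) =====
-- def fetchTechSkills(resume):
--     skills = []
--     skillSet = ["c++","java","python","html","css","database"]
--     words = resume.split(' ')
--     for skill in skillSet:
--         for w in words:
--             tmp = w.lower()
--             if tmp == skill:
--                 skills.append(tmp)
--     return skills
-- ===== SOURCE B (Python) =====
-- def fetchTechSkills(resume):
--     # One pass: group every lowercased word into a bucket keyed by itself,
--     # then emit the buckets for the six known skills in fixed order.
--     skillSet = ["c++", "java", "python", "html", "css", "database"]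
--     buckets = {}
--     for w in resume.split(' '):
--         tmp = w.lower()
--         buckets.setdefault(tmp, []).append(tmp)
--     skills = []
--     for skill in skillSet:
--         skills += buckets.get(skill, [])
--     return skills
-- ===== Notes on version B (the rewrite author's own statement) =====
-- stated objective: faster
-- what changed: B replaces A's six full scans of the word list (one per skill) with a single grouping pass into a dict of buckets keyed by the lowercased word, then concatenates the six skill buckets in skillSet order.
import Mathlib
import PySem

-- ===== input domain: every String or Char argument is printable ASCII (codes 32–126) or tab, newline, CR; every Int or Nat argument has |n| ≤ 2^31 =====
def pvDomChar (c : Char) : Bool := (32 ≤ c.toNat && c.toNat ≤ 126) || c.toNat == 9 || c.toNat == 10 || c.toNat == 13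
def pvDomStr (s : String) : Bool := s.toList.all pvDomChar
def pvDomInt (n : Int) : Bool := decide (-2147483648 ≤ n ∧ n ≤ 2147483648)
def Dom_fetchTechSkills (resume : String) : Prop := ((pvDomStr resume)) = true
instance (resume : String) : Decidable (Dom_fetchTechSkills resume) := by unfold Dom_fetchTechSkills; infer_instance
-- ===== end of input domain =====

-- B replaces A's per-skill rescans of the word list with a single grouping pass into word buckets, emitted in skillSet order (objective: fewer passes over the input).


-- ===== PORT A =====
-- literal port: for each skill, scan all words and append the lowercased word when it equals the skill
def fetchTechSkills (resume : String) : List String :=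
  let skillSet : List String := ["c++", "java", "python", "html", "css", "database"]
  let words := (PySem.Str.split? resume " ").getD []
  skillSet.foldl (fun skills skill =>
    words.foldl (fun skills w =>
      if PySem.Str.lower w == skill then skills ++ [PySem.Str.lower w] else skills) skills) []

-- ===== PORT B =====
-- literal port of Source B: one grouping pass into buckets keyed by the lowercased word, then concatenate skill buckets
def fetchTechSkills_alt (resume : String) : List String :=
  let skillSet : List String := ["c++", "java", "python", "html", "css", "database"]
  let buckets := ((PySem.Str.split? resume " ").getD []).foldl
    (fun d w => PySem.Dict.modify d (PySem.Str.lower w) [] (fun l => l ++ [PySem.Str.lower w]))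
    PySem.Dict.empty
  skillSet.foldl (fun skills skill => skills ++ PySem.Dict.getD buckets skill []) []

-- ===== PRECONDITION & SPEC =====
def Spec_fetchTechSkills (resume : String) (out : List String) : Prop := out = fetchTechSkills_alt resume
instance (resume : String) (out : List String) : Decidable (Spec_fetchTechSkills resume out) := by unfold Spec_fetchTechSkills; infer_instance

-- ===== CLAIM (what is proved, stated in full; the proofs are below) =====
def Claim_equal_fetchTechSkills : Prop := ∀ (resume : String), Dom_fetchTechSkills resume → Spec_fetchTechSkills resume (fetchTechSkills resume)

-- ===== LEMMAS AND PROOFS =====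

-- the bucket for key s after the grouping pass is exactly the lowered copies of the words whose lowering is s
theorem pv_bucket_getD (ws : List String) (d : PySem.Dict String (List String)) (s : String) :
    (ws.foldl (fun d w => PySem.Dict.modify d (PySem.Str.lower w) [] (fun l => l ++ [PySem.Str.lower w])) d).getD s []
      = d.getD s [] ++ (ws.filter (fun w => PySem.Str.lower w == s)).map PySem.Str.lower := by
  induction ws generalizing d with
  | nil => simp
  | cons w ws ih =>
    simp only [List.foldl_cons, ih, PySem.Dict.getD_modify, List.filter_cons]
    by_cases h : PySem.Str.lower w == s
    · have hs : s = PySem.Str.lower w := ((beq_iff_eq).mp h).symm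
      simp [hs]
    · have hs : ¬ s = PySem.Str.lower w := fun e => h (by simp [e])
      simp [h, hs]

theorem fetchTechSkills_spec : Claim_equal_fetchTechSkills := by
  intro resume _
  unfold Spec_fetchTechSkills fetchTechSkills fetchTechSkills_alt
  simp only [PySem.List.foldl_append_if, PySem.List.foldl_append_eq_flatMap, pv_bucket_getD,
    PySem.Dict.getD_empty, List.nil_append]
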